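-- pv_equiv track=rewrite | github.com/cryptolu/sparkle | modular_addition_division_property/mod_add.py | size_reduce
-- ===== SOURCE A (Python) =====
-- def size_reduce(kset):
--     result = set()
--     for x in kset:
--         for y in kset:
--             # x >= y (bitwise)
--             if x != y and (x & y == y):
--                 break
--         else:
--             result.add(x)
--     return result
-- ===== SOURCE B (Python) =====
-- def size_reduce(kset):
--     # single pass maintaining the antichain of minimal elements seen so far
--     minimals = []
--     for x in kset:
--         if any(y & x == y for y in minimals):
--             continue  # some kept element is a bitwise subset of x (or x itself)
--         minimals = [z for z in minimals if x & z != x] + [x]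
--     return set(minimals)
-- ===== Notes on version B (the rewrite author's own statement) =====
-- stated objective: alternative
-- what changed: Replaced the nested all-pairs scan (each element checked against the whole input) by a single pass that maintains the antichain of minimal elements seen so far: a new element is dropped if a kept element is its bitwise subset, otherwise it evicts its kept supersets and joins.
import Mathlib
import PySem

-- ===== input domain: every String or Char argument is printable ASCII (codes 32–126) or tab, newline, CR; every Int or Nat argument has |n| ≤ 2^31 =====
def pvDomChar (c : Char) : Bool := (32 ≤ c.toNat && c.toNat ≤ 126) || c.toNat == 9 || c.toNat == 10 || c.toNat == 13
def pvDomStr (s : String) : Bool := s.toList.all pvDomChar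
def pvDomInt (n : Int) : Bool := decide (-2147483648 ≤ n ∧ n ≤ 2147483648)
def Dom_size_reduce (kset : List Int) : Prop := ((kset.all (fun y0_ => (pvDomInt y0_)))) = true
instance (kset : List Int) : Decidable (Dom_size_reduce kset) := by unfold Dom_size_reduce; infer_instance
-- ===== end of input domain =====

-- B replaces A's nested all-pairs scan by a single pass maintaining the antichain of
-- minimal elements seen so far (objective: alternative algorithm, same worst-case cost).

-- ===== PORT A =====
-- A's inner 'for y in kset: if x != y and (x & y == y): break' — true iff the loop broke
def pvBreakA (x : Int) (ys : List Int) : Bool :=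
  match ys with
  | [] => false
  | y :: t => if x ≠ y ∧ PySem.Int.band x y = y then true else pvBreakA x t

def size_reduce (kset : List Int) : List Int :=
  kset.foldl (fun result x => if pvBreakA x kset then result else PySem.Set.add result x)
    PySem.Set.empty

-- ===== PORT B =====
def size_reduce_alt (kset : List Int) : List Int :=
  PySem.Set.ofList
    (kset.foldl (fun minimals x =>
      if minimals.any (fun y => PySem.Int.band y x == y) then minimals
      else minimals.filter (fun z => !(PySem.Int.band x z == x)) ++ [x]) [])

-- ===== PRECONDITION & SPEC =====
def Spec_size_reduce (kset : List Int) (out : List Int) : Prop := out = size_reduce_alt kset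
instance (kset : List Int) (out : List Int) : Decidable (Spec_size_reduce kset out) := by unfold Spec_size_reduce; infer_instance

-- ===== CLAIM (what is proved, stated in full; the proofs are below) =====
def Claim_equal_size_reduce : Prop := ∀ (kset : List Int), Dom_size_reduce kset → Spec_size_reduce kset (size_reduce kset)

-- ===== LEMMAS AND PROOFS =====

-- ---- bit-level facts about Python's & on Int (PySem.Int.band) ----
theorem pv_ldiff_add_and (m n : Nat) : Nat.ldiff m n + (m &&& n) = m := by
  induction m using Nat.binaryRec generalizing n with
  | zero => simp [Nat.ldiff]
  | bit b m ih =>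
    rw [← Nat.bit_bodd_div2 n, Nat.ldiff_bit, Nat.land_bit, Nat.bit_val, Nat.bit_val, Nat.bit_val]
    have := ih n.div2
    cases b <;> cases n.bodd <;> simp <;> omega

theorem pv_sub_and (m n : Nat) : m - (m &&& n) = Nat.ldiff m n := by
  have := pv_ldiff_add_and m n; omega

theorem pv_band_eq_land (a b : Int) : PySem.Int.band a b = Int.land a b := by
  rcases a with m | m <;> rcases b with n | n
  · show PySem.Int.band (↑m) (↑n) = _
    simp [PySem.Int.band, Int.land]
  · show PySem.Int.band (↑m) _ = _
    simp [PySem.Int.band, Int.land, Int.negSucc_eq, pv_sub_and]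
    intro h; exact absurd h (by omega)
  · simp [PySem.Int.band, Int.land, Int.negSucc_eq, pv_sub_and]
    intro h; exact absurd h (by omega)
  · simp [PySem.Int.band, Int.land, Int.negSucc_eq]
    omega

theorem pv_int_ext {a b : Int} (h : ∀ i, a.testBit i = b.testBit i) : a = b := by
  rcases a with m | m <;> rcases b with n | n
  · exact congrArg _ (Nat.eq_of_testBit_eq fun i => by simpa [Int.testBit] using h i)
  · exfalso
    have hm : m.testBit (m + n) = false :=
      Nat.testBit_eq_false_of_lt (lt_of_le_of_lt (Nat.le_add_right m n) (Nat.lt_two_pow_self))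
    have hn : n.testBit (m + n) = false :=
      Nat.testBit_eq_false_of_lt (lt_of_le_of_lt (Nat.le_add_left n m) (Nat.lt_two_pow_self))
    have := h (m + n)
    simp [Int.testBit, hm, hn] at this
  · exfalso
    have hm : m.testBit (m + n) = false :=
      Nat.testBit_eq_false_of_lt (lt_of_le_of_lt (Nat.le_add_right m n) (Nat.lt_two_pow_self))
    have hn : n.testBit (m + n) = false :=
      Nat.testBit_eq_false_of_lt (lt_of_le_of_lt (Nat.le_add_left n m) (Nat.lt_two_pow_self))
    have := h (m + n)
    simp [Int.testBit, hm, hn] at this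
  · have : m = n := Nat.eq_of_testBit_eq fun i => by
      have := h i
      simpa [Int.testBit] using this
    rw [this]

theorem pv_testBit_band (a b : Int) (i : Nat) :
    (PySem.Int.band a b).testBit i = (a.testBit i && b.testBit i) := by
  rw [pv_band_eq_land]; exact Int.testBit_land a b i

-- the bitwise-subset order: 'a ⊆ b' is 'band a b = a'
theorem pv_sub_trans {a b c : Int} (h1 : PySem.Int.band a b = a) (h2 : PySem.Int.band b c = b) :
    PySem.Int.band a c = a := by
  apply pv_int_ext; intro i
  have t1 := congrArg (fun z => Int.testBit z i) h1
  have t2 := congrArg (fun z => Int.testBit z i) h2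
  simp only [pv_testBit_band] at t1 t2 ⊢
  cases ha : a.testBit i <;> cases hb : b.testBit i <;> cases hc : c.testBit i <;> simp_all

theorem pv_sub_antisymm {a b : Int} (h1 : PySem.Int.band a b = a) (h2 : PySem.Int.band b a = b) :
    a = b := by
  calc a = PySem.Int.band a b := h1.symm
    _ = PySem.Int.band b a := PySem.Int.band_comm a b
    _ = b := h2

-- ---- minimality under the bitwise-subset order ----
-- 'x is minimal among p': no y in p is a proper bitwise subset of x
def pvIsMin (p : List Int) (x : Int) : Prop := ∀ y ∈ p, PySem.Int.band x y = y → y = x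

def pvIsMinB (p : List Int) (x : Int) : Bool :=
  p.all (fun y => !(PySem.Int.band x y == y) || (y == x))

theorem pv_isMinB_iff (p : List Int) (x : Int) : pvIsMinB p x = true ↔ pvIsMin p x := by
  unfold pvIsMinB pvIsMin
  rw [List.all_eq_true]
  constructor
  · intro h y hy hb
    rcases Bool.or_eq_true_iff.mp (h y hy) with h' | h'
    · exact absurd hb (by simpa using h')
    · simpa using h'
  · intro h y hy
    by_cases hb : PySem.Int.band x y = y
    · simp [h y hy hb]
    · simp [hb]

theorem pv_breakA_iff (x : Int) (l : List Int) :
    pvBreakA x l = true ↔ ∃ y ∈ l, x ≠ y ∧ PySem.Int.band x y = y := by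
  induction l with
  | nil => simp [pvBreakA]
  | cons y t ih =>
    by_cases h : x ≠ y ∧ PySem.Int.band x y = y <;> simp [pvBreakA, h, ih]

theorem pv_not_breakA (x : Int) (l : List Int) :
    (!pvBreakA x l) = pvIsMinB l x := by
  cases hb : pvBreakA x l with
  | true =>
    obtain ⟨y, hy, hxy, hband⟩ := (pv_breakA_iff x l).mp hb
    simp only [Bool.not_true]
    symm
    rw [Bool.eq_false_iff]
    intro hmin
    exact hxy ((pv_isMinB_iff l x).mp hmin y hy hband).symm
  | false =>
    simp only [Bool.not_false]
    symm
    rw [pv_isMinB_iff]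
    intro y hy hband
    by_contra hne
    have : pvBreakA x l = true :=
      (pv_breakA_iff x l).mpr ⟨y, hy, fun e => hne e.symm, hband⟩
    rw [hb] at this; exact Bool.false_ne_true this

-- every member of p has a minimal (in p) bitwise subset in p
theorem pv_exists_min_aux : ∀ (n : Nat) (p : List Int), p.length ≤ n → ∀ y ∈ p,
    ∃ w ∈ p, PySem.Int.band w y = w ∧ pvIsMin p w := by
  intro n
  induction n with
  | zero =>
    intro p hp y hy
    have : p = [] := List.eq_nil_of_length_eq_zero (Nat.le_zero.mp hp)
    subst this; simp at hy
  | succ n ih =>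
    intro p hp y hy
    by_cases hmin : pvIsMin p y
    · exact ⟨y, hy, PySem.Int.band_self y, hmin⟩
    · unfold pvIsMin at hmin; push_neg at hmin
      obtain ⟨z, hz, hband, hzy⟩ := hmin
      have hz' : z ∈ p.erase y := (List.mem_erase_of_ne hzy).mpr hz
      have hlen : (p.erase y).length ≤ n := by
        have := List.length_erase_of_mem hy; omega
      obtain ⟨w, hw, hwz, hwmin⟩ := ih (p.erase y) hlen z hz'
      have hzsuby : PySem.Int.band z y = z := by
        rw [PySem.Int.band_comm]; exact hband
      refine ⟨w, List.mem_of_mem_erase hw, pv_sub_trans hwz hzsuby, ?_⟩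
      intro v hv hvw
      by_cases hvy : v = y
      · exfalso
        subst hvy
        have hysubw : PySem.Int.band v w = v := by rw [PySem.Int.band_comm]; exact hvw
        have hysubz : PySem.Int.band v z = v := pv_sub_trans hysubw hwz
        exact hzy (pv_sub_antisymm hzsuby hysubz)
      · exact hwmin v ((List.mem_erase_of_ne hvy).mpr hv) hvw

theorem pv_exists_min (p : List Int) (y : Int) (hy : y ∈ p) :
    ∃ w ∈ p, PySem.Int.band w y = w ∧ pvIsMin p w :=
  pv_exists_min_aux p.length p le_rfl y hy

-- ---- A's fold as ofList of a filter ----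
theorem pv_foldl_add_filter (p : Int → Bool) (l : List Int) (acc : List Int) :
    l.foldl (fun r x => if p x then r else PySem.Set.add r x) acc
      = (l.filter (fun x => !p x)).foldl PySem.Set.add acc := by
  induction l generalizing acc with
  | nil => rfl
  | cons x t ih =>
    by_cases h : p x <;> simp [List.foldl, h, ih]

theorem pv_ofList_append_singleton (l : List Int) (x : Int) :
    PySem.Set.ofList (l ++ [x]) = PySem.Set.add (PySem.Set.ofList l) x := by
  rw [PySem.Set.ofList_eq_foldl, PySem.Set.ofList_eq_foldl, List.foldl_append]
  rfl

theorem pv_add_eq (s : List Int) (x : Int) :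
    PySem.Set.add s x = if x ∈ s then s else s ++ [x] := by
  by_cases h : x ∈ s <;> simp [PySem.Set.add, PySem.Set.contains, h]

-- first-occurrence dedup commutes with filtering by a predicate on values
theorem pv_ofList_filter (p : Int → Bool) (l : List Int) :
    PySem.Set.ofList (l.filter p) = (PySem.Set.ofList l).filter p := by
  induction l using List.reverseRecOn with
  | nil => rfl
  | append_singleton l x ih =>
    rw [List.filter_append, pv_ofList_append_singleton, pv_add_eq]
    by_cases hp : p x
    · have hfx : List.filter p [x] = [x] := by simp [hp]
      rw [hfx, pv_ofList_append_singleton, pv_add_eq]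
      by_cases hxl : x ∈ l
      · have h1 : x ∈ PySem.Set.ofList l := (PySem.Set.mem_ofList l x).mpr hxl
        simp [h1, ih, hp]
      · have h1 : x ∉ PySem.Set.ofList l := fun h => hxl ((PySem.Set.mem_ofList l x).mp h)
        simp [h1, ih, List.filter_append, hp]
    · have hfx : List.filter p [x] = [] := by simp [hp]
      rw [hfx, List.append_nil]
      by_cases hxl : x ∈ PySem.Set.ofList l
      · simp [hxl, ih]
      · simp [hxl, ih, List.filter_append, hp]

-- ---- B's loop and its invariant ----
def pvLoopB (l : List Int) : List Int :=
  l.foldl (fun minimals x =>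
    if minimals.any (fun y => PySem.Int.band y x == y) then minimals
    else minimals.filter (fun z => !(PySem.Int.band x z == x)) ++ [x]) []

theorem pv_alt_eq (kset : List Int) : size_reduce_alt kset = PySem.Set.ofList (pvLoopB kset) := rfl

-- B's antichain after processing l is exactly the minimal elements of l, first occurrences first
theorem pv_loop_char (l : List Int) :
    pvLoopB l = (PySem.Set.ofList l).filter (fun z => pvIsMinB l z) := by
  induction l using List.reverseRecOn with
  | nil => rfl
  | append_singleton q x ih =>
    have hstep : pvLoopB (q ++ [x]) =
        (if (pvLoopB q).any (fun y => PySem.Int.band y x == y) then pvLoopB q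
         else (pvLoopB q).filter (fun z => !(PySem.Int.band x z == x)) ++ [x]) := by
      unfold pvLoopB
      rw [List.foldl_append]
      rfl
    rw [hstep, pv_ofList_append_singleton, pv_add_eq]
    by_cases hxq : x ∈ q
    · -- CASE 1: x already seen; a kept minimal subset of x exists, the loop skips, dedup unchanged
      obtain ⟨w, hwq, hwx, hwmin⟩ := pv_exists_min q x hxq
      have hwmem : w ∈ pvLoopB q := by
        rw [ih, List.mem_filter]
        exact ⟨(PySem.Set.mem_ofList q w).mpr hwq, (pv_isMinB_iff q w).mpr hwmin⟩
      have hany : (pvLoopB q).any (fun y => PySem.Int.band y x == y) = true := by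
        rw [List.any_eq_true]
        exact ⟨w, hwmem, by simp [hwx]⟩
      rw [hany, if_pos rfl, if_pos ((PySem.Set.mem_ofList q x).mpr hxq), ih]
      apply List.filter_congr
      intro z hz
      apply Bool.eq_iff_iff.mpr
      rw [pv_isMinB_iff, pv_isMinB_iff]
      constructor
      · intro h y hy hb
        rcases List.mem_append.mp hy with h' | h'
        · exact h y h' hb
        · exact h y (List.mem_singleton.mp h' ▸ hxq) hb
      · intro h y hy hb
        exact h y (List.mem_append_left _ hy) hb
    · have hxq' : x ∉ PySem.Set.ofList q := fun h => hxq ((PySem.Set.mem_ofList q x).mp h)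
      by_cases hminx : pvIsMin (q ++ [x]) x
      · -- CASE 2: x new and minimal: the loop appends x and evicts its strict supersets
        have hany : (pvLoopB q).any (fun y => PySem.Int.band y x == y) = false := by
          rw [List.any_eq_false]
          intro y hy
          have hyq : y ∈ q := by
            have := (List.mem_filter.mp (ih ▸ hy)).1
            exact (PySem.Set.mem_ofList q y).mp this
          simp only [beq_iff_eq]
          intro hb
          have : PySem.Int.band x y = y := by rw [PySem.Int.band_comm]; exact hb
          exact hxq ((hminx y (List.mem_append_left _ hyq) this) ▸ hyq)
        rw [hany, if_neg (by simp), if_neg hxq', List.filter_append]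
        have hfx : List.filter (fun z => pvIsMinB (q ++ [x]) z) [x] = [x] := by
          simp [(pv_isMinB_iff (q ++ [x]) x).mpr hminx]
        rw [hfx, ih, List.filter_filter]
        congr 1
        apply List.filter_congr
        intro z hz
        have hzq : z ∈ q := (PySem.Set.mem_ofList q z).mp hz
        have hzx : z ≠ x := fun e => hxq (e ▸ hzq)
        have hiff : pvIsMin (q ++ [x]) z ↔ (pvIsMin q z ∧ PySem.Int.band x z ≠ x) := by
          constructor
          · intro h
            refine ⟨fun y hy hb => h y (List.mem_append_left _ hy) hb, fun hb => ?_⟩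
            have hzx' : PySem.Int.band z x = x := by rw [PySem.Int.band_comm]; exact hb
            exact hzx (h x (List.mem_append_right _ (List.mem_singleton_self x)) hzx').symm
          · rintro ⟨hzmin, hnb⟩ y hy hb
            rcases List.mem_append.mp hy with h' | h'
            · exact hzmin y h' hb
            · exfalso
              have hx' : y = x := List.mem_singleton.mp h'
              rw [hx'] at hb
              exact hnb (by rw [PySem.Int.band_comm]; exact hb)
        by_cases hm : pvIsMin (q ++ [x]) z
        · have e1 : pvIsMinB (q ++ [x]) z = true := (pv_isMinB_iff _ _).mpr hm
          obtain ⟨h1, h2⟩ := hiff.mp hm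
          have e2 : pvIsMinB q z = true := (pv_isMinB_iff _ _).mpr h1
          simp [e1, e2, h2]
        · have e1 : pvIsMinB (q ++ [x]) z = false := by
            rw [Bool.eq_false_iff]
            intro h; exact hm ((pv_isMinB_iff _ _).mp h)
          by_cases hq1 : pvIsMin q z
          · have hb : PySem.Int.band x z = x := by
              by_contra hnb
              exact hm (hiff.mpr ⟨hq1, hnb⟩)
            have e2 : pvIsMinB q z = true := (pv_isMinB_iff _ _).mpr hq1
            simp [e1, e2, hb]
          · have e2 : pvIsMinB q z = false := by
              rw [Bool.eq_false_iff]
              intro h; exact hq1 ((pv_isMinB_iff _ _).mp h)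
            simp [e1, e2]
      · -- CASE 3: x new but not minimal: a kept minimal subset exists, loop skips, x filtered out
        have hex : ∃ y ∈ q, PySem.Int.band x y = y ∧ y ≠ x := by
          unfold pvIsMin at hminx
          push_neg at hminx
          obtain ⟨y, hy, hb, hne⟩ := hminx
          rcases List.mem_append.mp hy with h' | h'
          · exact ⟨y, h', hb, hne⟩
          · exact absurd (List.mem_singleton.mp h') hne
        obtain ⟨y, hyq, hyx, hynx⟩ := hex
        obtain ⟨w, hwq, hwy, hwmin⟩ := pv_exists_min q y hyq
        have hysubx : PySem.Int.band y x = y := by rw [PySem.Int.band_comm]; exact hyx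
        have hwx : PySem.Int.band w x = w := pv_sub_trans hwy hysubx
        have hwmem : w ∈ pvLoopB q := by
          rw [ih, List.mem_filter]
          exact ⟨(PySem.Set.mem_ofList q w).mpr hwq, (pv_isMinB_iff q w).mpr hwmin⟩
        have hany : (pvLoopB q).any (fun y => PySem.Int.band y x == y) = true := by
          rw [List.any_eq_true]
          exact ⟨w, hwmem, by simp [hwx]⟩
        rw [hany, if_pos rfl, if_neg hxq', List.filter_append]
        have hfx : List.filter (fun z => pvIsMinB (q ++ [x]) z) [x] = [] := by
          have e : pvIsMinB (q ++ [x]) x = false := by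
            rw [Bool.eq_false_iff]
            intro h; exact hminx ((pv_isMinB_iff _ _).mp h)
          simp [e]
        rw [hfx, List.append_nil, ih]
        apply List.filter_congr
        intro z hz
        have hzq : z ∈ q := (PySem.Set.mem_ofList q z).mp hz
        apply Bool.eq_iff_iff.mpr
        rw [pv_isMinB_iff, pv_isMinB_iff]
        constructor
        · intro h y' hy' hb
          rcases List.mem_append.mp hy' with h' | h'
          · exact h y' h' hb
          · exfalso
            have hx' : y' = x := List.mem_singleton.mp h'
            rw [hx'] at hb
            -- band z x = x : x ⊆ z; then y ⊆ x ⊆ z forces y = z, then x = y, contradiction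
            have hxsubz : PySem.Int.band x z = x := by rw [PySem.Int.band_comm]; exact hb
            have hysubz : PySem.Int.band y z = y := pv_sub_trans hysubx hxsubz
            have hyz : PySem.Int.band z y = y := by rw [PySem.Int.band_comm]; exact hysubz
            have : y = z := h y hyq hyz
            subst this
            exact hynx (pv_sub_antisymm hxsubz hysubx).symm
        · intro h y' hy' hb
          exact h y' (List.mem_append_left _ hy') hb

-- ===== VERDICT (by name: the statement is the Claim_ definition above) =====
theorem size_reduce_spec : Claim_equal_size_reduce := by
  intro kset _
  unfold Spec_size_reduce
  have hA : size_reduce kset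
      = PySem.Set.ofList (kset.filter (fun x => !pvBreakA x kset)) := by
    unfold size_reduce
    rw [pv_foldl_add_filter, PySem.Set.ofList_eq_foldl]
    rfl
  have hfilter : kset.filter (fun x => !pvBreakA x kset)
      = kset.filter (fun z => pvIsMinB kset z) :=
    List.filter_congr (fun a _ => pv_not_breakA a kset)
  have hnodup : (pvLoopB kset).Nodup := by
    rw [pv_loop_char]
    exact (PySem.Set.nodup_ofList kset).filter _
  rw [hA, hfilter, pv_ofList_filter, ← pv_loop_char, pv_alt_eq,
      PySem.Set.ofList_eq_self_of_nodup _ hnodup]
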